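-- pv_equiv track=rewrite | github.com/oovz/novel-downloader-image-to-text-mapping | scripts/processors/sync_processor.py | get_filenames_for_characters
-- ===== SOURCE A (Python) =====
-- from typing import Dict, List, Optional, Set, Tuple
--
-- def get_filenames_for_characters(
--
--     filename_mapping: Dict[str, str],
--     characters: Set[str]
-- ) -> Dict[str, List[str]]:
--     """
--     Get filenames associated with specific characters.
--
--     Args:
--         filename_mapping: Dictionary mapping filenames to characters
--         characters: Set of characters to find filenames for
--
--     Returns:
--         Dictionary mapping characters to lists of filenames
--     """
--     char_to_filenames: Dict[str, List[str]] = {}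
--
--     for filename, character in filename_mapping.items():
--         if character in characters:
--             if character not in char_to_filenames:
--                 char_to_filenames[character] = []
--             char_to_filenames[character].append(filename)
--
--     return char_to_filenames
-- ===== SOURCE B (Python) =====
-- def get_filenames_for_characters(filename_mapping, characters):
--     matched = [ch for ch in filename_mapping.values() if ch in characters]
--     return {c: [f for f, ch in filename_mapping.items() if ch == c]
--             for c in dict.fromkeys(matched)}
-- ===== Notes on version B (the rewrite author's own statement) =====
-- stated objective: alternative
-- what changed: Replaced the single-pass bucket-building loop over the mapping by a grouping comprehension: collect the matched characters in first-occurrence order (dict.fromkeys) and build each character's filename list with one comprehension over the mapping.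
import Mathlib
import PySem

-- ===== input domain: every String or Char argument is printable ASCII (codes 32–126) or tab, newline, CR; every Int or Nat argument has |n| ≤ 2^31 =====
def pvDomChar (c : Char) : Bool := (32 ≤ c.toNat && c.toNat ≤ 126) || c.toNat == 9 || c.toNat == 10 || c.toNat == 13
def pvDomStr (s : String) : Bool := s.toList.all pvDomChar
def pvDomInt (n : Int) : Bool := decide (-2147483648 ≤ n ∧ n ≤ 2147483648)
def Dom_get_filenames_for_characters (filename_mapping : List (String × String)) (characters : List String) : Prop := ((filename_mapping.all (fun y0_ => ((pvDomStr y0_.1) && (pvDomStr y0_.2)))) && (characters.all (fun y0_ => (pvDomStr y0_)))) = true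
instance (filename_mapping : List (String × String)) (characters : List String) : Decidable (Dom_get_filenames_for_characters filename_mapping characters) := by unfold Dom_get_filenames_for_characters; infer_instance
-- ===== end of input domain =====

-- B groups by comprehension (ordered dedup of the matched characters, then one scan per character)
-- instead of A's single-pass dict-bucket loop; objective: alternative decomposition, not speed.

-- ===== PORT A =====
-- literal port of A's loop: for (filename, character) in items(): if character in characters:
--   if character not in d: d[character] = []  ;  d[character].append(filename)  ; return d
def get_filenames_for_characters (filename_mapping : List (String × String)) (characters : List String) : List (String × List String) :=
  (filename_mapping.foldl
    (fun d p =>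
      if characters.contains p.2 then
        let d' := if d.contains p.2 then d else d.insert p.2 []
        d'.modify p.2 [] (fun l => l ++ [p.1])
      else d)
    (PySem.Dict.empty : PySem.Dict String (List String))).items

-- ===== PORT B =====
-- matched = [ch for ch in values() if ch in characters];
-- {c: [f for f, ch in items() if ch == c] for c in dict.fromkeys(matched)}
def get_filenames_for_characters_alt (filename_mapping : List (String × String)) (characters : List String) : List (String × List String) :=
  let matched := (filename_mapping.map (fun p => p.2)).filter (fun ch => characters.contains ch)
  (PySem.List.dedup matched).map
    (fun c => (c, (filename_mapping.filter (fun p => p.2 == c)).map (fun p => p.1)))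

-- ===== PRECONDITION & SPEC =====
def Spec_get_filenames_for_characters (filename_mapping : List (String × String)) (characters : List String) (out : List (String × List String)) : Prop := out = get_filenames_for_characters_alt filename_mapping characters
instance (filename_mapping : List (String × String)) (characters : List String) (out : List (String × List String)) : Decidable (Spec_get_filenames_for_characters filename_mapping characters out) := by unfold Spec_get_filenames_for_characters; infer_instance

-- ===== CLAIM (what is proved, stated in full; the proofs are below) =====
def Claim_equal_get_filenames_for_characters : Prop := ∀ (filename_mapping : List (String × String)) (characters : List String), Dom_get_filenames_for_characters filename_mapping characters → Spec_get_filenames_for_characters filename_mapping characters (get_filenames_for_characters filename_mapping characters)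

-- ===== LEMMAS AND PROOFS =====

-- the guarded two-step body of A's loop ('if missing: insert []; then append') is one Dict.modify
lemma pvStepEq (d : PySem.Dict String (List String)) (p : String × String) :
    (let d' := if d.contains p.2 then d else d.insert p.2 []
     d'.modify p.2 [] (fun l => l ++ [p.1]))
    = d.modify p.2 [] (fun l => l ++ [p.1]) := by
  by_cases h : d.contains p.2
  · simp [h]
  · simp only [Bool.not_eq_true] at h
    simp only [h, Bool.false_eq_true, if_false]
    simp only [PySem.Dict.modify, PySem.Dict.getD_insert_self, PySem.Dict.insert_insert_self,
      PySem.Dict.getD_of_not_contains d [] h]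

-- mapping snd commutes with filtering on snd
lemma pvMapSndFilter (m : List (String × String)) (q : String → Bool) :
    (m.filter (fun p => q p.2)).map (fun p => p.2) = (m.map (fun p => p.2)).filter q := by
  induction m with
  | nil => rfl
  | cons a t ih => by_cases h : q a.2 <;> simp [h, ih]

-- items of the unguarded grouping fold = ordered-dedup keys paired with the per-key filter
lemma pvMain (m : List (String × String)) :
    (m.foldl (fun d p => d.modify p.2 [] (fun l => l ++ [p.1]))
        (PySem.Dict.empty : PySem.Dict String (List String))).items
    = (PySem.List.dedup (m.map (fun p => p.2))).map
        (fun c => (c, (m.filter (fun p => p.2 == c)).map (fun p => p.1))) := by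
  have hswap : m.foldl (fun d p => d.modify p.2 [] (fun l => l ++ [p.1]))
        (PySem.Dict.empty : PySem.Dict String (List String))
      = (m.map Prod.swap).foldl (fun d p => d.modify p.1 [] (fun l => l ++ [p.2])) PySem.Dict.empty := by
    rw [List.foldl_map]; simp
  rw [hswap]
  set D := (m.map Prod.swap).foldl (fun d p => d.modify p.1 [] (fun l => l ++ [p.2])) (PySem.Dict.empty : PySem.Dict String (List String)) with hD
  have hnd : D.keys.Nodup := by
    rw [hD]
    exact PySem.Dict.nodup_keys_foldl_modify_key _ Prod.fst [] (fun _ p => (fun l => l ++ [p.2])) _ (by simp [PySem.Dict.keys_empty])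
  rw [PySem.Dict.items_eq_map_keys D hnd []]
  have hkeys : D.keys = PySem.Set.ofList (m.map (fun p => p.2)) := by
    rw [hD, PySem.Dict.keys_foldl_modify_key _ Prod.fst [] (fun _ p => (fun l => l ++ [p.2]))]
    simp [PySem.Dict.keys_empty, List.map_map]
    rfl
  have hget : ∀ c, D.getD c [] = (m.filter (fun p => p.2 == c)).map (fun p => p.1) := by
    intro c
    rw [hD, PySem.Dict.getD_foldl_modify_append]
    simp [PySem.Dict.getD_empty, List.filter_map, Function.comp_def]
  rw [hkeys, ← PySem.List.dedup_eq_ofList]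
  exact List.map_congr_left (fun c _ => by rw [hget c])

-- ===== VERDICT (by name: the statement is the Claim_ definition above) =====
theorem get_filenames_for_characters_spec : Claim_equal_get_filenames_for_characters := by
  intro m cs _
  unfold Spec_get_filenames_for_characters get_filenames_for_characters get_filenames_for_characters_alt
  have hf : (fun (d : PySem.Dict String (List String)) (p : String × String) =>
      if cs.contains p.2 then
        (let d' := if d.contains p.2 then d else d.insert p.2 []
         d'.modify p.2 [] (fun l => l ++ [p.1]))
      else d)
      = (fun d p => if cs.contains p.2 then d.modify p.2 [] (fun l => l ++ [p.1]) else d) := by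
    funext d p
    by_cases h : cs.contains p.2 <;> simp only [h, if_true, Bool.false_eq_true, if_false, pvStepEq]
  rw [hf]
  rw [show (List.foldl (fun (d : PySem.Dict String (List String)) p => if cs.contains p.2 = true then d.modify p.2 [] fun l => l ++ [p.1] else d) PySem.Dict.empty m)
      = ((m.filter (fun p => cs.contains p.2)).foldl (fun d p => d.modify p.2 [] fun l => l ++ [p.1]) PySem.Dict.empty) from (List.foldl_filter).symm]
  rw [pvMain, pvMapSndFilter]
  refine List.map_congr_left (fun c hc => ?_)
  have hcs : c ∈ cs := by
    rw [PySem.List.dedup_eq_ofList, PySem.Set.mem_ofList] at hc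
    simpa using (List.mem_filter.mp hc).2
  rw [List.filter_filter]
  congr 2
  refine List.filter_congr (fun p _ => ?_)
  cases h2 : (p.2 == c) with
  | false => simp
  | true => simp [eq_of_beq h2, hcs]
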